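-- pv_equiv track=rewrite | github.com/dfgan/TC_CQ | xml_2_json/other_def/labelImg2coc0.py | findClassName
-- ===== SOURCE A (Python) =====
-- def findClassName(json_path, classname_to_id):
--     keyClasses_ = list(classname_to_id.keys())
--     className_ = ''
--     longestSize = 0
--     for key in keyClasses_:
--         if key in json_path:
--             if longestSize < len(key):
--                 className_ = key
--                 longestSize = len(key)
--     return className_
-- ===== SOURCE B (Python) =====
-- def findClassName(json_path, classname_to_id):
--     for key in sorted(classname_to_id, key=len, reverse=True):
--         if key in json_path:
--             return key
--     return ''
-- ===== Notes on version B (the rewrite author's own statement) =====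
-- stated objective: alternative
-- what changed: Replaces the max-length-tracking single scan with a stable descending sort of the keys by length followed by a short-circuiting first-substring-match scan.
import Mathlib
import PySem

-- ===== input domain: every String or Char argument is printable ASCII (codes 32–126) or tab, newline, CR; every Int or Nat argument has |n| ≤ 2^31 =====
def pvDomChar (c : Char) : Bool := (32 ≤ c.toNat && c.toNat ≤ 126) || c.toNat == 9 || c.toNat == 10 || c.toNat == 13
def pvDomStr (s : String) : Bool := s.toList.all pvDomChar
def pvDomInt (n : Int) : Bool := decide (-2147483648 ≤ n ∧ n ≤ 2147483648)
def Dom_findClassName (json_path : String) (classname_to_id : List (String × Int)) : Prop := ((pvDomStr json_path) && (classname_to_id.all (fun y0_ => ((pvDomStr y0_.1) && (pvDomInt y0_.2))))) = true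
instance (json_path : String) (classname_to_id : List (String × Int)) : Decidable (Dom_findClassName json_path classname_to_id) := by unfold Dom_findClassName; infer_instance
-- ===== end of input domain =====

-- B replaces A's max-length-tracking scan by a stable descending sort of the keys by length followed by a first-match scan (alternative decomposition, same results).


-- ===== PORT A =====
def findClassName (json_path : String) (classname_to_id : List (String × Int)) : String :=
  let keyClasses_ := classname_to_id.map Prod.fst
  let res := keyClasses_.foldl
    (fun (st : String × Int) key =>
      if PySem.Str.isIn key json_path then
        if st.2 < PySem.Str.len key then (key, PySem.Str.len key) else st
      else st)
    ("", 0)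
  res.1

-- ===== PORT B =====
-- the early-returning for-loop of Source B
def pvFirstMatch (json_path : String) : List String → String
  | [] => ""
  | k :: rest => if PySem.Str.isIn k json_path then k else pvFirstMatch json_path rest

def findClassName_alt (json_path : String) (classname_to_id : List (String × Int)) : String :=
  pvFirstMatch json_path (PySem.List.sorted (classname_to_id.map Prod.fst) PySem.Str.len true)

-- ===== PRECONDITION & SPEC =====
def Spec_findClassName (json_path : String) (classname_to_id : List (String × Int)) (out : String) : Prop := out = findClassName_alt json_path classname_to_id
instance (json_path : String) (classname_to_id : List (String × Int)) (out : String) : Decidable (Spec_findClassName json_path classname_to_id out) := by unfold Spec_findClassName; infer_instance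

-- ===== CLAIM (what is proved, stated in full; the proofs are below) =====
def Claim_equal_findClassName : Prop := ∀ (json_path : String) (classname_to_id : List (String × Int)), Dom_findClassName json_path classname_to_id → Spec_findClassName json_path classname_to_id (findClassName json_path classname_to_id)


-- ===== LEMMAS AND PROOFS =====

theorem pv_insertBy_nil {a : Type} (before : a -> a -> Bool) (x : a) :
    PySem.List.insertBy before x [] = [x] := rfl

theorem pv_insertBy_cons {a : Type} (before : a -> a -> Bool) (x y : a) (ys : List a) :
    PySem.List.insertBy before x (y :: ys)
      = if before x y then x :: y :: ys else y :: PySem.List.insertBy before x ys := rfl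

-- a foldl whose body is guarded by `if p x` is the foldl over the filtered list
theorem pv_foldl_guard {a b : Type} (p : a -> Bool) (f : b -> a -> b) :
    forall (l : List a) (init : b),
      l.foldl (fun st x => if p x then f st x else st) init = (l.filter p).foldl f init := by
  intro l
  induction l with
  | nil => intro init; rfl
  | cons x t ih =>
      intro init
      by_cases h : p x = true <;> simp [h, ih]

-- B's loop returns the head (default "") of the matching elements
theorem pvFirstMatch_eq_headD (jp : String) (l : List String) :
    pvFirstMatch jp l = (l.filter (fun k => PySem.Str.isIn k jp)).headD "" := by
  induction l with
  | nil => rfl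
  | cons k t ih =>
      rw [List.filter_cons, pvFirstMatch]
      by_cases h : PySem.Str.isIn k jp = true
      · rw [if_pos h, if_pos h, List.headD_cons]
      · rw [if_neg h, if_neg h, ih]

theorem pv_insertBy_all {a : Type} (before : a -> a -> Bool) (x : a) (l : List a)
    (h : forall z, z ∈ l -> before x z = true) :
    PySem.List.insertBy before x l = x :: l := by
  cases l with
  | nil => rfl
  | cons y ys => rw [pv_insertBy_cons, if_pos (h y (List.mem_cons_self ..))]

-- filtering commutes with inserting into a list ordered so `before` never fires later
theorem pv_filter_insertBy {a : Type} (p : a -> Bool) (before : a -> a -> Bool) (x : a)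
    (S : a -> a -> Prop)
    (compat : forall y z, S y z -> before x y = true -> before x z = true) :
    forall l : List a, l.Pairwise S ->
      (PySem.List.insertBy before x l).filter p
        = if p x then PySem.List.insertBy before x (l.filter p) else l.filter p := by
  intro l
  induction l with
  | nil =>
      intro _
      rw [pv_insertBy_nil, List.filter_cons, List.filter_nil, pv_insertBy_nil]
  | cons y ys ih =>
      intro hp
      rcases List.pairwise_cons.mp hp with ⟨hy, hp'⟩
      rw [pv_insertBy_cons]
      by_cases hb : before x y = true
      · rw [if_pos hb, List.filter_cons]
        by_cases hpx : p x = true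
        · have hall : forall z, z ∈ (y :: ys).filter p -> before x z = true := by
            intro z hz
            rcases List.mem_cons.mp (List.mem_of_mem_filter hz) with h | h
            · exact h ▸ hb
            · exact compat y z (hy z h) hb
          rw [if_pos hpx, if_pos hpx, pv_insertBy_all before x _ hall]
        · rw [if_neg hpx, if_neg hpx]
      · rw [if_neg hb, List.filter_cons]
        by_cases hpy : p y = true
        · rw [if_pos hpy, ih hp', List.filter_cons, if_pos hpy]
          by_cases hpx : p x = true
          · rw [if_pos hpx, if_pos hpx, pv_insertBy_cons, if_neg hb]
          · rw [if_neg hpx, if_neg hpx]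
        · rw [if_neg hpy, ih hp', List.filter_cons, if_neg hpy]

theorem pv_sorted_concat (xs : List String) (x : String) :
    PySem.List.sorted (xs ++ [x]) PySem.Str.len true
      = PySem.List.insertBy (fun a b => decide (PySem.Str.len b < PySem.Str.len a)) x
          (PySem.List.sorted xs PySem.Str.len true) := by
  rw [PySem.List.sorted_rev_eq_foldl_insertBy, PySem.List.sorted_rev_eq_foldl_insertBy,
    List.foldl_append, List.foldl_cons, List.foldl_nil]

-- filtering commutes with the stable length-descending sort
theorem pv_filter_sorted (p : String -> Bool) (xs : List String) :
    (PySem.List.sorted xs PySem.Str.len true).filter p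
      = PySem.List.sorted (xs.filter p) PySem.Str.len true := by
  induction xs using List.reverseRecOn with
  | nil => rfl
  | append_singleton t x ih =>
      rw [pv_sorted_concat,
        pv_filter_insertBy p _ x (fun a b => PySem.Str.len b ≤ PySem.Str.len a)
          (fun y z h1 h2 => by simp only [decide_eq_true_eq] at *; omega)
          _ (PySem.List.sorted_pairwise_rev t PySem.Str.len),
        List.filter_append, List.filter_cons, List.filter_nil]
      by_cases hpx : p x = true
      · rw [if_pos hpx, if_pos hpx, ih, pv_sorted_concat]
      · rw [if_neg hpx, if_neg hpx, ih, List.append_nil]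

theorem pv_len_eq_zero (s : String) (h : PySem.Str.len s = 0) : s = "" := by
  rw [PySem.Str.len_eq] at h
  exact String.toList_eq_nil_iff.mp (List.length_eq_zero_iff.mp (by exact_mod_cast h))

-- A's max-tracking fold over a list computes the head of its stable descending sort (with its length)
theorem pv_fold_eq_sorted_head (ms : List String) :
    ms.foldl (fun (st : String × Int) key =>
        if st.2 < PySem.Str.len key then (key, PySem.Str.len key) else st) ("", 0)
      = ((PySem.List.sorted ms PySem.Str.len true).headD "",
         PySem.Str.len ((PySem.List.sorted ms PySem.Str.len true).headD "")) := by
  induction ms using List.reverseRecOn with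
  | nil => decide
  | append_singleton t k ih =>
      rw [List.foldl_append, ih, pv_sorted_concat, List.foldl_cons, List.foldl_nil]
      cases hs : PySem.List.sorted t PySem.Str.len true with
      | nil =>
          rw [List.headD_nil, pv_insertBy_nil, List.headD_cons]
          by_cases h : PySem.Str.len "" < PySem.Str.len k
          · rw [if_pos h]
          · rw [if_neg h]
            have h0 : PySem.Str.len k = 0 := by
              have hk0 : PySem.Str.len k = (k.toList.length : Int) := PySem.Str.len_eq k
              have he : PySem.Str.len "" = 0 := by decide
              omega
            rw [pv_len_eq_zero k h0]
      | cons h' t' =>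
          rw [List.headD_cons, pv_insertBy_cons]
          by_cases h : PySem.Str.len h' < PySem.Str.len k
          · rw [if_pos h,
              if_pos (show (fun a b => decide (PySem.Str.len b < PySem.Str.len a)) k h' = true from
                decide_eq_true h),
              List.headD_cons]
          · rw [if_neg h,
              if_neg (show ¬ (fun a b => decide (PySem.Str.len b < PySem.Str.len a)) k h' = true from by
                simpa using h),
              List.headD_cons]

-- ===== VERDICT (by name: the statement is the Claim_ definition above) =====
theorem findClassName_spec : Claim_equal_findClassName := by
  intro json_path classname_to_id _
  show findClassName json_path classname_to_id = findClassName_alt json_path classname_to_id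
  unfold findClassName findClassName_alt
  dsimp only
  rw [pvFirstMatch_eq_headD, pv_filter_sorted,
    pv_foldl_guard (fun key => PySem.Str.isIn key json_path)
      (fun (st : String × Int) key =>
        if st.2 < PySem.Str.len key then (key, PySem.Str.len key) else st),
    pv_fold_eq_sorted_head]
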